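-- pv_equiv track=rewrite | github.com/ihemmige/comp_genomics_class | hw2/hw2q5.py | process_mismatches
-- ===== SOURCE A (Python) =====
-- def phred33_to_q(qual):
--   """ Turn Phred+33 ASCII-encoded quality into Phred-scaled integer """
--   return ord(qual)-33
--
-- def process_mismatches(genome, differences_to_check):
--   to_print = []
--   # for each index, check its mismatches for most likely non-reference base
--   for index, bases in differences_to_check.items():
--     base_to_weight = {} # ATGC to their total weights
--     for base, qual in bases:
--       value = phred33_to_q(qual)
--       if base in base_to_weight:
--         base_to_weight[base] += value
--       else:
--         base_to_weight[base] = value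
--
--     # sort highest to lowest by total weight, then base
--     ordered_bases = sorted(base_to_weight.items(), key=lambda item: (-item[1], item[0]))
--
--     first_base = ''
--     second_base = '-'
--     first_weight = 0
--     second_weight = 0
--     # if any differences were found
--     if len(ordered_bases) > 0:
--       # if the first non-reference base has high enough weight
--       if ordered_bases[0][1] > 20:
--         first_base = ordered_bases[0][0]
--         first_weight = ordered_bases[0][1]
--         # if there's a second base and its weight is large enough
--         if len(ordered_bases) > 1 and ordered_bases[1][1] > 20:
--           second_base = ordered_bases[1][0]
--           second_weight = ordered_bases[1][1]
--     if first_base: # not the empty string, then we need to write a line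
--       new_row = [str(index), genome[index], first_base, str(first_weight), second_base, str(second_weight)]
--       to_print.append((index, " ".join(new_row)))
--   to_print.sort()
--   return [t[1] for t in to_print]
-- ===== SOURCE B (Python) =====
-- def phred33_to_q(qual):
--   """ Turn Phred+33 ASCII-encoded quality into Phred-scaled integer """
--   return ord(qual)-33
--
-- def process_mismatches(genome, differences_to_check):
--   out = []
--   # visit indices in sorted order, so no final pairwise sort is needed
--   for index, bases in sorted(differences_to_check.items(), key=lambda kv: kv[0]):
--     weights = {}
--     for base, qual in bases:
--       weights[base] = weights.get(base, 0) + phred33_to_q(qual)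
--     # one linear scan tracking best and second-best under key (-weight, base)
--     best = None
--     second = None
--     for base, w in weights.items():
--       if best is None or w > best[1] or (w == best[1] and base < best[0]):
--         second = best
--         best = (base, w)
--       elif second is None or w > second[1] or (w == second[1] and base < second[0]):
--         second = (base, w)
--     if best is not None and best[1] > 20:
--       if second is not None and second[1] > 20:
--         second_base, second_weight = second
--       else:
--         second_base, second_weight = '-', 0
--       out.append(" ".join([str(index), genome[index], best[0], str(best[1]),
--                            second_base, str(second_weight)]))
--   return out
-- ===== Notes on version B (the rewrite author's own statement) =====
-- stated objective: alternative
-- what changed: B sorts the indices up front and emits rows in order (dropping A's final pairwise sort of (index,row) tuples), and replaces A's per-index sorted()-then-[0]/[1] selection by a single linear scan over the aggregated weights that tracks the best and second-best entries under the key (-weight, base).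
-- outside the precondition, e.g. on process_mismatches('A', {0: [('', 'Z')]}): A returns [], B returns ['0 A  57 - 0']; on process_mismatches('A', {5: [('C', 'Z')]}): A raises IndexError, B raises IndexError; on process_mismatches('A', {0: [('C', 'ZZ')]}): A raises TypeError, B raises TypeError
import Mathlib
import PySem

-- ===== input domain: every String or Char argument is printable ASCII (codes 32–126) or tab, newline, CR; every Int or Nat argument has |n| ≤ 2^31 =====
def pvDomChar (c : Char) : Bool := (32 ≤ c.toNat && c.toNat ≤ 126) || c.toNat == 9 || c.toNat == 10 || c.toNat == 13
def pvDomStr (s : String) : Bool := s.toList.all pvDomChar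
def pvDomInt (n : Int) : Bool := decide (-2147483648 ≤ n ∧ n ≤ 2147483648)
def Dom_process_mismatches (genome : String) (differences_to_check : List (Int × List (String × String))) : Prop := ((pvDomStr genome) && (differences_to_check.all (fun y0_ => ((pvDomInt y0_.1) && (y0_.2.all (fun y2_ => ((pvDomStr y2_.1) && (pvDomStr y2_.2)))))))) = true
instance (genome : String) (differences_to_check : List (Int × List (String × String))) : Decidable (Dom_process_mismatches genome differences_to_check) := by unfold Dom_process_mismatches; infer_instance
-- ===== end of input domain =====

-- B visits indices in sorted order (no final pairwise sort) and picks the top two bases per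
-- index by a single linear scan instead of sorting; alternative decomposition, same results.


-- ===== PORT A =====
-- ord(qual) - 33; Python's ord raises TypeError unless the string has exactly one character
-- (Pre_ excludes other quality strings), so the fallback arm is never reached on Pre_.
def pvPhred (qual : String) : Int :=
  match qual.toList with
  | [c] => (c.toNat : Int) - 33
  | _ => 0

-- genome[index] as the 1-character string Python yields; none = IndexError, excluded by Pre_.
def pvCharStr (genome : String) (i : Int) : String :=
  match PySem.Str.pyGet? genome i with
  | some c => String.ofList [c]
  | none => ""

def process_mismatches (genome : String) (differences_to_check : List (Int × List (String × String))) : List String :=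
  let to_print : List (Int × String) :=
    differences_to_check.foldl (fun to_print p =>
      let index := p.1
      let base_to_weight : PySem.Dict String Int :=
        p.2.foldl (fun d bq =>
          let value := pvPhred bq.2
          match d.get? bq.1 with
          | some w => d.insert bq.1 (w + value)
          | none => d.insert bq.1 value) PySem.Dict.empty
      let ordered := PySem.List.sorted2 base_to_weight.items (fun it => -it.2) (fun it => it.1)
      -- (first_base, second_base, first_weight, second_weight), assigned as in A's nested ifs
      let st : String × String × Int × Int :=
        if 0 < ordered.length then
          match PySem.List.pyGet? ordered 0 with
          | some o0 =>
            if 20 < o0.2 then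
              if 1 < ordered.length then
                match PySem.List.pyGet? ordered 1 with
                | some o1 => if 20 < o1.2 then (o0.1, o1.1, o0.2, o1.2) else (o0.1, "-", o0.2, 0)
                | none => (o0.1, "-", o0.2, 0)
              else (o0.1, "-", o0.2, 0)
            else ("", "-", 0, 0)
          | none => ("", "-", 0, 0)
        else ("", "-", 0, 0)
      if st.1 ≠ "" then
        to_print ++ [(index, PySem.Str.join " "
          [PySem.Int.toStr index, pvCharStr genome index, st.1,
           PySem.Int.toStr st.2.2.1, st.2.1, PySem.Int.toStr st.2.2.2])]
      else to_print) []
  (PySem.List.sorted2 to_print (fun t => t.1) (fun t => t.2)).map (fun t => t.2)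

-- ===== PORT B =====
def process_mismatches_alt (genome : String) (differences_to_check : List (Int × List (String × String))) : List String :=
  (PySem.List.sorted differences_to_check (fun kv => kv.1)).foldl (fun out p =>
    let index := p.1
    let weights : PySem.Dict String Int :=
      p.2.foldl (fun d bq => d.insert bq.1 (d.getD bq.1 0 + pvPhred bq.2)) PySem.Dict.empty
    -- one scan over the aggregated items, tracking (best, second) under key (-weight, base)
    let bs : Option (String × Int) × Option (String × Int) :=
      weights.items.foldl (fun st x =>
        match st.1 with
        | none => (some x, none)
        | some b =>
          if decide (b.2 < x.2) || (x.2 == b.2 && decide (x.1 < b.1)) then (some x, some b)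
          else
            match st.2 with
            | none => (some b, some x)
            | some s =>
              if decide (s.2 < x.2) || (x.2 == s.2 && decide (x.1 < s.1)) then (some b, some x)
              else (some b, some s)) (none, none)
    match bs.1 with
    | some b =>
      if 20 < b.2 then
        let sw : String × Int :=
          match bs.2 with
          | some s => if 20 < s.2 then (s.1, s.2) else ("-", 0)
          | none => ("-", 0)
        out ++ [PySem.Str.join " "
          [PySem.Int.toStr index, pvCharStr genome index, b.1,
           PySem.Int.toStr b.2, sw.1, PySem.Int.toStr sw.2]]
      else out
    | none => out) []

-- ===== PRECONDITION & SPEC =====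
-- Pre_ excludes: quality strings not of length 1 (Python's ord raises TypeError); indices outside
-- [-len(genome), len(genome)) whose list gives some base a summed weight above 20 (A then emits a
-- row and genome[index] raises IndexError); empty base strings, on which A's use of '' as its
-- no-base-found sentinel silently drops a winning row; and duplicate indices, which a Python dict
-- argument cannot represent.
def Pre_process_mismatches (genome : String) (differences_to_check : List (Int × List (String × String))) : Prop :=
  (differences_to_check.map (fun p => p.1)).Nodup ∧
  ∀ p ∈ differences_to_check,
    ((∃ bq ∈ p.2, 20 < ((p.2.filter (fun e => e.1 = bq.1)).map
        (fun e => match e.2.toList with | [c] => (c.toNat : Int) - 33 | _ => 0)).sum) →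
      (-(genome.toList.length : Int) ≤ p.1 ∧ p.1 < (genome.toList.length : Int))) ∧
    ∀ bq ∈ p.2, bq.1 ≠ "" ∧ bq.2.toList.length = 1
instance (genome : String) (differences_to_check : List (Int × List (String × String))) : Decidable (Pre_process_mismatches genome differences_to_check) := by unfold Pre_process_mismatches; infer_instance

def pvWitness_process_mismatches : String × (List (Int × List (String × String))) :=
  ("ACGT", [(2, [("A", "#")]), (0, [("G", "Z"), ("T", "Z"), ("G", "!")])])

def Spec_process_mismatches (genome : String) (differences_to_check : List (Int × List (String × String))) (out : List String) : Prop := out = process_mismatches_alt genome differences_to_check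
instance (genome : String) (differences_to_check : List (Int × List (String × String))) (out : List String) : Decidable (Spec_process_mismatches genome differences_to_check out) := by unfold Spec_process_mismatches; infer_instance

-- ===== CLAIM (what is proved, stated in full; the proofs are below) =====
def Claim_equal_process_mismatches : Prop := ∀ (genome : String) (differences_to_check : List (Int × List (String × String))), Dom_process_mismatches genome differences_to_check → Pre_process_mismatches genome differences_to_check → Spec_process_mismatches genome differences_to_check (process_mismatches genome differences_to_check)

-- ===== LEMMAS AND PROOFS =====

-- shared per-index pieces, used only by the proofs below
def pvAgg (bases : List (String × String)) : PySem.Dict String Int :=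
  bases.foldl (fun d bq => d.insert bq.1 (d.getD bq.1 0 + pvPhred bq.2)) PySem.Dict.empty

def pvBef (x y : String × Int) : Bool :=
  decide (y.2 < x.2) || (x.2 == y.2 && decide (x.1 < y.1))

def pvOrd (bases : List (String × String)) : List (String × Int) :=
  (pvAgg bases).items.foldl (fun acc x => PySem.List.insertBy pvBef x acc) []

def pvEmit (p : Int × List (String × String)) : Bool :=
  match pvOrd p.2 with
  | [] => false
  | o0 :: _ => decide (20 < o0.2)

def pvLine (genome : String) (p : Int × List (String × String)) : String :=
  match pvOrd p.2 with
  | [] => ""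
  | o0 :: rest =>
    let sw : String × Int :=
      match rest with
      | [] => ("-", 0)
      | o1 :: _ => if 20 < o1.2 then (o1.1, o1.2) else ("-", 0)
    PySem.Str.join " "
      [PySem.Int.toStr p.1, pvCharStr genome p.1, o0.1,
       PySem.Int.toStr o0.2, sw.1, PySem.Int.toStr sw.2]

-- the generic top-2 scan step
def pvStep {α : Type} (before : α → α → Bool) (st : Option α × Option α) (x : α) : Option α × Option α :=
  match st.1 with
  | none => (some x, none)
  | some b =>
    if before x b then (some x, some b)
    else
      match st.2 with
      | none => (some b, some x)
      | some s => if before x s then (some b, some x) else (some b, some s)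

theorem pvStep_insertBy {α : Type} (before : α → α → Bool) (x : α) (acc : List α) :
    pvStep before (acc[0]?, acc[1]?) x
      = ((PySem.List.insertBy before x acc)[0]?, (PySem.List.insertBy before x acc)[1]?) := by
  match acc with
  | [] => simp [pvStep, PySem.List.insertBy]
  | [a0] => by_cases h : before x a0 <;> simp [pvStep, PySem.List.insertBy, h]
  | a0 :: a1 :: rest =>
    by_cases h : before x a0
    · simp [pvStep, PySem.List.insertBy, h]
    · by_cases h1 : before x a1 <;> simp [pvStep, PySem.List.insertBy, h, h1]

theorem pvTop2_foldl {α : Type} (before : α → α → Bool) (l acc : List α) :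
    l.foldl (pvStep before) (acc[0]?, acc[1]?)
      = ((l.foldl (fun a x => PySem.List.insertBy before x a) acc)[0]?,
         (l.foldl (fun a x => PySem.List.insertBy before x a) acc)[1]?) := by
  induction l generalizing acc with
  | nil => simp
  | cons x l ih =>
    simp only [List.foldl_cons, pvStep_insertBy]
    exact ih (PySem.List.insertBy before x acc)

theorem pvBef_eq (x y : String × Int) :
    (decide ((fun it : String × Int => -it.2) x < (fun it : String × Int => -it.2) y) ||
      (!decide ((fun it : String × Int => -it.2) y < (fun it : String × Int => -it.2) x) &&
        decide ((fun it : String × Int => it.1) x < (fun it : String × Int => it.1) y))) = pvBef x y := by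
  simp only [pvBef]
  rcases lt_trichotomy x.2 y.2 with h | h | h
  · simp [h, not_lt_of_gt h, ne_of_lt h, neg_lt_neg_iff]
  · simp [h]
  · simp [not_lt_of_gt h, neg_lt_neg_iff, h]

theorem pvOrd_eq_sorted2 (bases : List (String × String)) :
    PySem.List.sorted2 (pvAgg bases).items (fun it => -it.2) (fun it => it.1) = pvOrd bases := by
  have hf : (fun a b : String × Int =>
      decide ((fun it : String × Int => -it.2) a < (fun it : String × Int => -it.2) b) ||
        (!decide ((fun it : String × Int => -it.2) b < (fun it : String × Int => -it.2) a) &&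
          decide ((fun it : String × Int => it.1) a < (fun it : String × Int => it.1) b))) = pvBef := by
    funext a b; exact pvBef_eq a b
  simp only [PySem.List.sorted2, pvOrd, Bool.false_eq_true, if_false, hf]

theorem pvAggA_eq (bases : List (String × String)) :
    bases.foldl (fun d bq =>
      let value := pvPhred bq.2
      match d.get? bq.1 with
      | some w => d.insert bq.1 (w + value)
      | none => d.insert bq.1 value) PySem.Dict.empty = pvAgg bases := by
  unfold pvAgg
  apply PySem.List.foldl_congr_mem
  intro d bq _
  cases h : d.get? bq.1 with
  | some w => simp [PySem.Dict.getD_of_get?_eq_some d 0 h]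
  | none => simp [PySem.Dict.getD_of_get?_eq_none d 0 h]

theorem pvAgg_keys (bases : List (String × String)) :
    (pvAgg bases).keys = PySem.Set.ofList (bases.map (fun bq => bq.1)) := by
  unfold pvAgg
  rw [PySem.Dict.keys_foldl_insert_key]
  simp [PySem.Dict.keys_empty, PySem.Set.update, PySem.Set.ofList_eq_foldl]

theorem pvOrd_head_mem {bases : List (String × String)} {o0 : String × Int} {rest : List (String × Int)}
    (h : pvOrd bases = o0 :: rest) : o0.1 ∈ bases.map (fun bq => bq.1) := by
  have hmem : o0 ∈ pvOrd bases := by rw [h]; exact List.mem_cons_self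
  rw [← pvOrd_eq_sorted2] at hmem
  have : o0 ∈ (pvAgg bases).items := (PySem.List.sorted2_perm _ _ _ _).subset hmem
  have hk : o0.1 ∈ (pvAgg bases).keys := PySem.Dict.mem_keys_of_mem_items _ this
  rw [pvAgg_keys] at hk
  exact (PySem.Set.mem_ofList _ _).mp hk

theorem pvBBody (genome : String) (out : List String) (p : Int × List (String × String)) :
    (fun (out : List String) (p : Int × List (String × String)) =>
      let index := p.1
      let weights : PySem.Dict String Int :=
        p.2.foldl (fun d bq => d.insert bq.1 (d.getD bq.1 0 + pvPhred bq.2)) PySem.Dict.empty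
      let bs : Option (String × Int) × Option (String × Int) :=
        weights.items.foldl (fun st x =>
          match st.1 with
          | none => (some x, none)
          | some b =>
            if decide (b.2 < x.2) || (x.2 == b.2 && decide (x.1 < b.1)) then (some x, some b)
            else
              match st.2 with
              | none => (some b, some x)
              | some s =>
                if decide (s.2 < x.2) || (x.2 == s.2 && decide (x.1 < s.1)) then (some b, some x)
                else (some b, some s)) (none, none)
      match bs.1 with
      | some b =>
        if 20 < b.2 then
          let sw : String × Int :=
            match bs.2 with
            | some s => if 20 < s.2 then (s.1, s.2) else ("-", 0)
            | none => ("-", 0)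
          out ++ [PySem.Str.join " "
            [PySem.Int.toStr index, pvCharStr genome index, b.1,
             PySem.Int.toStr b.2, sw.1, PySem.Int.toStr sw.2]]
        else out
      | none => out) out p
    = if pvEmit p then out ++ [pvLine genome p] else out := by
  have hstep : (fun (st : Option (String × Int) × Option (String × Int)) (x : String × Int) =>
      match st.1 with
      | none => (some x, none)
      | some b =>
        if decide (b.2 < x.2) || (x.2 == b.2 && decide (x.1 < b.1)) then (some x, some b)
        else
          match st.2 with
          | none => (some b, some x)
          | some s =>
            if decide (s.2 < x.2) || (x.2 == s.2 && decide (x.1 < s.1)) then (some b, some x)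
            else (some b, some s)) = pvStep pvBef := by
    funext st x
    rcases st with ⟨b?, s?⟩
    cases b? <;> cases s? <;> simp [pvStep, pvBef]
  have h2 : (p.2.foldl (fun d bq => d.insert bq.1 (d.getD bq.1 0 + pvPhred bq.2))
        PySem.Dict.empty).items.foldl (pvStep pvBef) (none, none)
      = ((pvOrd p.2)[0]?, (pvOrd p.2)[1]?) := by
    have h := pvTop2_foldl pvBef (pvAgg p.2).items []
    simpa [pvOrd, pvAgg] using h
  simp only [hstep, h2]
  rcases hord : pvOrd p.2 with _ | ⟨o0, rest⟩
  · simp [pvEmit, hord]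
  · rcases rest with _ | ⟨o1, t⟩
    · by_cases h0 : 20 < o0.2 <;> simp [pvEmit, pvLine, hord, h0]
    · by_cases h0 : 20 < o0.2
      · by_cases h1 : 20 < o1.2 <;> simp [pvEmit, pvLine, hord, h0, h1]
      · simp [pvEmit, hord, h0]

theorem pvABody (genome : String) (acc : List (Int × String)) (p : Int × List (String × String))
    (hb : ∀ bq ∈ p.2, bq.1 ≠ "") :
    (fun (to_print : List (Int × String)) (p : Int × List (String × String)) =>
      let index := p.1
      let base_to_weight : PySem.Dict String Int :=
        p.2.foldl (fun d bq =>
          let value := pvPhred bq.2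
          match d.get? bq.1 with
          | some w => d.insert bq.1 (w + value)
          | none => d.insert bq.1 value) PySem.Dict.empty
      let ordered := PySem.List.sorted2 base_to_weight.items (fun it => -it.2) (fun it => it.1)
      let st : String × String × Int × Int :=
        if 0 < ordered.length then
          match PySem.List.pyGet? ordered 0 with
          | some o0 =>
            if 20 < o0.2 then
              if 1 < ordered.length then
                match PySem.List.pyGet? ordered 1 with
                | some o1 => if 20 < o1.2 then (o0.1, o1.1, o0.2, o1.2) else (o0.1, "-", o0.2, 0)
                | none => (o0.1, "-", o0.2, 0)
              else (o0.1, "-", o0.2, 0)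
            else ("", "-", 0, 0)
          | none => ("", "-", 0, 0)
        else ("", "-", 0, 0)
      if st.1 ≠ "" then
        to_print ++ [(index, PySem.Str.join " "
          [PySem.Int.toStr index, pvCharStr genome index, st.1,
           PySem.Int.toStr st.2.2.1, st.2.1, PySem.Int.toStr st.2.2.2])]
      else to_print) acc p
    = if pvEmit p then acc ++ [(p.1, pvLine genome p)] else acc := by
  have hagg : p.2.foldl (fun d bq =>
        let value := pvPhred bq.2
        match d.get? bq.1 with
        | some w => d.insert bq.1 (w + value)
        | none => d.insert bq.1 value) PySem.Dict.empty = pvAgg p.2 := pvAggA_eq p.2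
  have hord : PySem.List.sorted2 (pvAgg p.2).items (fun it => -it.2) (fun it => it.1) = pvOrd p.2 :=
    pvOrd_eq_sorted2 p.2
  simp only [hagg, hord]
  rcases ho : pvOrd p.2 with _ | ⟨o0, rest⟩
  · simp [pvEmit, ho]
  · have hne : o0.1 ≠ "" := by
      rcases List.mem_map.mp (pvOrd_head_mem ho) with ⟨bq, hbq, hfst⟩
      rw [← hfst]; exact hb bq hbq
    rcases rest with _ | ⟨o1, t⟩
    · by_cases h0 : 20 < o0.2 <;> simp [pvEmit, pvLine, ho, h0, hne]
    · by_cases h0 : 20 < o0.2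
      · by_cases h1 : 20 < o1.2 <;>
          simp [pvEmit, pvLine, ho, h0, h1, hne]
      · simp [pvEmit, ho, h0]

theorem pvSorted2_eq (xs ys : List (Int × String)) (hperm : ys.Perm xs)
    (hp : ys.Pairwise (fun a b => a.1 < b.1)) :
    PySem.List.sorted2 xs (fun t => t.1) (fun t => t.2) = ys := by
  have hkey : PySem.List.sorted2 xs (fun t : Int × String => t.1) (fun t => t.2)
      = PySem.List.sorted xs (fun t : Int × String => toLex (t.1, t.2)) := by
    have hf : (fun a b : Int × String =>
        decide ((fun t : Int × String => t.1) a < (fun t : Int × String => t.1) b) ||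
          (!decide ((fun t : Int × String => t.1) b < (fun t : Int × String => t.1) a) &&
            decide ((fun t : Int × String => t.2) a < (fun t : Int × String => t.2) b)))
        = (fun a b : Int × String =>
            decide ((fun t : Int × String => toLex (t.1, t.2)) a < (fun t : Int × String => toLex (t.1, t.2)) b)) := by
      funext a b
      simp only [Prod.Lex.toLex_lt_toLex]
      rcases lt_trichotomy a.1 b.1 with h | h | h
      · simp [h, lt_asymm h]
      · simp [h]
      · simp [lt_asymm h, ne_of_gt h, not_le_of_gt h]
    simp only [PySem.List.sorted2, PySem.List.sorted, Bool.false_eq_true, if_false, hf]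
  rw [hkey]
  apply PySem.List.sorted_eq_of_perm_of_pairwise_lt _ _ _ hperm
  exact hp.imp (fun h => Prod.Lex.toLex_lt_toLex.mpr (Or.inl h))

theorem pvA_eq (genome : String) (diffs : List (Int × List (String × String)))
    (hb : ∀ p ∈ diffs, ∀ bq ∈ p.2, bq.1 ≠ "") :
    process_mismatches genome diffs
      = (PySem.List.sorted2 ((diffs.filter pvEmit).map (fun p => (p.1, pvLine genome p)))
          (fun t => t.1) (fun t => t.2)).map (fun t => t.2) := by
  unfold process_mismatches
  rw [PySem.List.foldl_congr_mem _ _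
        (fun acc p => if pvEmit p then acc ++ [(p.1, pvLine genome p)] else acc) _
        (fun acc p hp => pvABody genome acc p (fun bq hbq => hb p hp bq hbq)),
      PySem.List.foldl_append_if]
  simp

theorem pvB_eq (genome : String) (diffs : List (Int × List (String × String))) :
    process_mismatches_alt genome diffs
      = ((PySem.List.sorted diffs (fun kv => kv.1)).filter pvEmit).map (pvLine genome) := by
  unfold process_mismatches_alt
  rw [PySem.List.foldl_congr_mem _ _
        (fun out p => if pvEmit p then out ++ [pvLine genome p] else out) _
        (fun out p _ => pvBBody genome out p),
      PySem.List.foldl_append_if]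
  simp

theorem pvMain (genome : String) (diffs : List (Int × List (String × String)))
    (hnd : (diffs.map (fun p => p.1)).Nodup)
    (hb : ∀ p ∈ diffs, ∀ bq ∈ p.2, bq.1 ≠ "") :
    process_mismatches genome diffs = process_mismatches_alt genome diffs := by
  rw [pvA_eq genome diffs hb, pvB_eq genome diffs]
  set S := PySem.List.sorted diffs (fun kv => kv.1) with hS
  have hS_perm : S.Perm diffs := PySem.List.sorted_perm diffs (fun kv => kv.1) false
  have hfst_nodup : (S.map (fun p => p.1)).Nodup :=
    ((hS_perm.map (fun p => p.1)).nodup_iff).mpr hnd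
  have hSlt : S.Pairwise (fun a b => a.1 < b.1) := by
    have h1 := PySem.List.sorted_pairwise diffs (fun kv => kv.1)
    have h2 : S.Pairwise (fun a b => a.1 ≠ b.1) := List.pairwise_map.mp hfst_nodup
    exact (List.pairwise_and_iff.mpr ⟨h1, h2⟩).imp (fun h => lt_of_le_of_ne h.1 h.2)
  have hperm : ((S.filter pvEmit).map (fun p => (p.1, pvLine genome p))).Perm
      ((diffs.filter pvEmit).map (fun p => (p.1, pvLine genome p))) :=
    (hS_perm.filter pvEmit).map _
  have hT : ((S.filter pvEmit).map (fun p => (p.1, pvLine genome p))).Pairwise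
      (fun a b => a.1 < b.1) := by
    apply List.pairwise_map.mpr
    exact (hSlt.filter pvEmit).imp (fun h => h)
  rw [pvSorted2_eq _ _ hperm hT]
  simp [List.map_map, Function.comp]

-- ===== VERDICT (by name: the statement is the Claim_ definition above) =====
theorem process_mismatches_spec : Claim_equal_process_mismatches := by
  intro genome diffs _ hpre
  unfold Spec_process_mismatches
  exact pvMain genome diffs hpre.1 (fun p hp bq hbq => ((hpre.2 p hp).2 bq hbq).1)
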